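-- pv_equiv track=rewrite | github.com/ErmiasKetos/CFTray | app.py | get_reagent_color
-- ===== SOURCE A (Python) =====
-- def get_reagent_color(reagent_code):
--     color_map = {
--         'gray': ['KR1E', 'KR1S', 'KR2S', 'KR3E', 'KR3S', 'KR4E', 'KR4S', 'KR5E', 'KR5S', 'KR6E1', 'KR6E2', 'KR6E3', 'KR13E1', 'KR13S', 'KR14E', 'KR14S', 'KR15E', 'KR15S'],
--         'violet': ['KR7E1', 'KR7E2', 'KR8E1', 'KR8E2', 'KR19E1', 'KR19E2', 'KR19E3', 'KR20E', 'KR36E1', 'KR36E2', 'KR40E1', 'KR40E2'],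
--         'green': ['KR9E1', 'KR9E2', 'KR17E1', 'KR17E2', 'KR17E3', 'KR28E1', 'KR28E2', 'KR28E3'],
--         'orange': ['KR10E1', 'KR10E2', 'KR10E3', 'KR12E1', 'KR12E2', 'KR12E3', 'KR18E1', 'KR18E2', 'KR22E1', 'KR27E1', 'KR27E2', 'KR42E1', 'KR42E2'],
--         'white': ['KR11E', 'KR21E1'],
--         'blue': ['KR16E1', 'KR16E2', 'KR16E3', 'KR16E4', 'KR30E1', 'KR30E2', 'KR30E3', 'KR31E1', 'KR31E2', 'KR34E1', 'KR34E2'],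
--         'red': ['KR29E1', 'KR29E2', 'KR29E3'],
--         'yellow': ['KR35E1', 'KR35E2']
--     }
--     for color, reagents in color_map.items():
--         if any(reagent_code.startswith(r) for r in reagents):
--             return color
--     return 'lightgray'  # Default color if not found
-- ===== SOURCE B (Python) =====
-- # Compact one-column table of 'prefix:color' entries, parsed once at import into a
-- # flat dict, then a longest-prefix lookup over slices of the input (no startswith scan).
-- _ITEMS = [
--     'KR1E:gray', 'KR1S:gray', 'KR2S:gray', 'KR3E:gray', 'KR3S:gray', 'KR4E:gray',
--     'KR4S:gray', 'KR5E:gray', 'KR5S:gray', 'KR6E1:gray', 'KR6E2:gray', 'KR6E3:gray',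
--     'KR13E1:gray', 'KR13S:gray', 'KR14E:gray', 'KR14S:gray', 'KR15E:gray', 'KR15S:gray',
--     'KR7E1:violet', 'KR7E2:violet', 'KR8E1:violet', 'KR8E2:violet', 'KR19E1:violet', 'KR19E2:violet',
--     'KR19E3:violet', 'KR20E:violet', 'KR36E1:violet', 'KR36E2:violet', 'KR40E1:violet', 'KR40E2:violet',
--     'KR9E1:green', 'KR9E2:green', 'KR17E1:green', 'KR17E2:green', 'KR17E3:green', 'KR28E1:green',
--     'KR28E2:green', 'KR28E3:green', 'KR10E1:orange', 'KR10E2:orange', 'KR10E3:orange', 'KR12E1:orange',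
--     'KR12E2:orange', 'KR12E3:orange', 'KR18E1:orange', 'KR18E2:orange', 'KR22E1:orange', 'KR27E1:orange',
--     'KR27E2:orange', 'KR42E1:orange', 'KR42E2:orange', 'KR11E:white', 'KR21E1:white', 'KR16E1:blue',
--     'KR16E2:blue', 'KR16E3:blue', 'KR16E4:blue', 'KR30E1:blue', 'KR30E2:blue', 'KR30E3:blue',
--     'KR31E1:blue', 'KR31E2:blue', 'KR34E1:blue', 'KR34E2:blue', 'KR29E1:red', 'KR29E2:red',
--     'KR29E3:red', 'KR35E1:yellow', 'KR35E2:yellow',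
-- ]
--
-- _PREFIX_TO_COLOR = {}
-- for _item in _ITEMS:
--     _key, _, _color = _item.partition(':')
--     _PREFIX_TO_COLOR[_key] = _color
--
-- _MAX_PREFIX_LEN = max(map(len, _PREFIX_TO_COLOR))
--
-- def get_reagent_color(reagent_code):
--     # probe slices of the input from longest to shortest (longest-prefix lookup)
--     for i in range(min(len(reagent_code), _MAX_PREFIX_LEN), 0, -1):
--         color = _PREFIX_TO_COLOR.get(reagent_code[:i])
--         if color is not None:
--             return color
--     return 'lightgray'
-- ===== Notes on version B (the rewrite author's own statement) =====
-- stated objective: alternative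
-- what changed: A scans all 69 table entries with startswith under a color->list dict; B parses a compact 'prefix:color' string table once into a flat prefix->color dict and probes it with slices of the input from longest to shortest (longest-prefix lookup), valid because no table prefix is a prefix of another.
import Mathlib
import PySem

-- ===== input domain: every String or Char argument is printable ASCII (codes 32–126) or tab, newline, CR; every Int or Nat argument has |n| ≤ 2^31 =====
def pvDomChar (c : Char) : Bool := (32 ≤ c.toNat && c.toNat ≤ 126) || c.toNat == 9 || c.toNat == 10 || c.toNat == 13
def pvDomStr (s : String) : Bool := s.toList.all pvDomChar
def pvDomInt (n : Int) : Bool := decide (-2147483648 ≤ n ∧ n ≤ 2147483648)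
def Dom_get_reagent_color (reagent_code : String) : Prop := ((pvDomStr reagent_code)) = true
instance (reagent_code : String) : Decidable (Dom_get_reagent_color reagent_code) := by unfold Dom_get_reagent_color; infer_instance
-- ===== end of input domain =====

set_option maxRecDepth 100000

-- B replaces A's startswith scan over a colour→prefix-list table by a flat prefix→colour
-- dict (parsed once from a compact one-column table) probed with input slices longest-first.

-- ===== PORT A =====
-- the color_map literal of A
def colorTable : List (String × List String) :=
  [ ("gray", ["KR1E", "KR1S", "KR2S", "KR3E", "KR3S", "KR4E", "KR4S", "KR5E", "KR5S", "KR6E1", "KR6E2", "KR6E3", "KR13E1", "KR13S", "KR14E", "KR14S", "KR15E", "KR15S"]),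
    ("violet", ["KR7E1", "KR7E2", "KR8E1", "KR8E2", "KR19E1", "KR19E2", "KR19E3", "KR20E", "KR36E1", "KR36E2", "KR40E1", "KR40E2"]),
    ("green", ["KR9E1", "KR9E2", "KR17E1", "KR17E2", "KR17E3", "KR28E1", "KR28E2", "KR28E3"]),
    ("orange", ["KR10E1", "KR10E2", "KR10E3", "KR12E1", "KR12E2", "KR12E3", "KR18E1", "KR18E2", "KR22E1", "KR27E1", "KR27E2", "KR42E1", "KR42E2"]),
    ("white", ["KR11E", "KR21E1"]),
    ("blue", ["KR16E1", "KR16E2", "KR16E3", "KR16E4", "KR30E1", "KR30E2", "KR30E3", "KR31E1", "KR31E2", "KR34E1", "KR34E2"]),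
    ("red", ["KR29E1", "KR29E2", "KR29E3"]),
    ("yellow", ["KR35E1", "KR35E2"]) ]

-- the 'for color, reagents in color_map.items():' loop with 'any(startswith)'
def aScan (reagent_code : String) : List (String × List String) → String
  | [] => "lightgray"
  | (color, reagents) :: rest =>
    if reagents.any (fun r => PySem.Str.startswith reagent_code r) then color
    else aScan reagent_code rest

def get_reagent_color (reagent_code : String) : String :=
  aScan reagent_code colorTable

-- ===== PORT B =====
-- _ITEMS: the compact 'prefix:color' one-column table of Source B
def itemsList : List String :=
  [ "KR1E:gray", "KR1S:gray", "KR2S:gray", "KR3E:gray", "KR3S:gray", "KR4E:gray",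
    "KR4S:gray", "KR5E:gray", "KR5S:gray", "KR6E1:gray", "KR6E2:gray", "KR6E3:gray",
    "KR13E1:gray", "KR13S:gray", "KR14E:gray", "KR14S:gray", "KR15E:gray", "KR15S:gray",
    "KR7E1:violet", "KR7E2:violet", "KR8E1:violet", "KR8E2:violet", "KR19E1:violet", "KR19E2:violet",
    "KR19E3:violet", "KR20E:violet", "KR36E1:violet", "KR36E2:violet", "KR40E1:violet", "KR40E2:violet",
    "KR9E1:green", "KR9E2:green", "KR17E1:green", "KR17E2:green", "KR17E3:green", "KR28E1:green",
    "KR28E2:green", "KR28E3:green", "KR10E1:orange", "KR10E2:orange", "KR10E3:orange", "KR12E1:orange",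
    "KR12E2:orange", "KR12E3:orange", "KR18E1:orange", "KR18E2:orange", "KR22E1:orange", "KR27E1:orange",
    "KR27E2:orange", "KR42E1:orange", "KR42E2:orange", "KR11E:white", "KR21E1:white", "KR16E1:blue",
    "KR16E2:blue", "KR16E3:blue", "KR16E4:blue", "KR30E1:blue", "KR30E2:blue", "KR30E3:blue",
    "KR31E1:blue", "KR31E2:blue", "KR34E1:blue", "KR34E2:blue", "KR29E1:red", "KR29E2:red",
    "KR29E3:red", "KR35E1:yellow", "KR35E2:yellow" ]

-- _item.partition(':') keeping pieces 1 and 3, ported by hand at char level: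
-- exact — chars before the FIRST ':' and chars after it (whole string and "" when
-- ':' is absent, matching Python's (s, '', '')).
def partColon : List Char → List Char × List Char
  | [] => ([], [])
  | c :: rest =>
    if c = ':' then ([], rest)
    else let p := partColon rest; (c :: p.1, p.2)

def partitionColon (it : String) : String × String :=
  let p := partColon it.toList
  (String.ofList p.1, String.ofList p.2)

-- the 'for _item in _ITEMS: _PREFIX_TO_COLOR[_key] = _color' loop
def prefixDict : PySem.Dict String String :=
  itemsList.foldl
    (fun d it => let kc := partitionColon it; d.insert kc.1 kc.2) PySem.Dict.empty

-- _MAX_PREFIX_LEN = max(map(len, _PREFIX_TO_COLOR))  (dict is nonempty, so Python's max returns)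
def maxPrefixLen : Nat := ((prefixDict.keys.map (fun k => k.toList.length)).max?).getD 0

-- 'for i in range(min(len(reagent_code), _MAX_PREFIX_LEN), 0, -1):' — i counts down;
-- reagent_code[:i] is exactly take i for i ≥ 1
def bScan (reagent_code : String) : Nat → String
  | 0 => "lightgray"
  | i + 1 =>
    match prefixDict.get? (String.ofList (reagent_code.toList.take (i + 1))) with
    | some c => c
    | none => bScan reagent_code i

def get_reagent_color_alt (reagent_code : String) : String :=
  bScan reagent_code (min reagent_code.toList.length maxPrefixLen)

-- ===== PRECONDITION & SPEC =====
def Spec_get_reagent_color (reagent_code : String) (out : String) : Prop := out = get_reagent_color_alt reagent_code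
instance (reagent_code : String) (out : String) : Decidable (Spec_get_reagent_color reagent_code out) := by unfold Spec_get_reagent_color; infer_instance

-- ===== CLAIM (what is proved, stated in full; the proofs are below) =====
def Claim_equal_get_reagent_color : Prop := ∀ (reagent_code : String), Dom_get_reagent_color reagent_code → Spec_get_reagent_color reagent_code (get_reagent_color reagent_code)

-- ===== LEMMAS AND PROOFS =====

-- A's table flattened to (prefix, color) pairs, for reasoning only
def flatPairs : List (String × String) :=
  colorTable.flatMap (fun g => g.2.map (fun r => (r, g.1)))

-- first-match color over a flat (prefix, color) list
def findColor (fl : List (String × String)) (code : String) : String :=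
  ((fl.find? (fun p => PySem.Str.startswith code p.1)).map Prod.snd).getD "lightgray"

theorem findColor_group (code c : String) (rs : List String) (tail : List (String × String)) :
    findColor ((rs.map (fun r => (r, c))) ++ tail) code =
      if rs.any (fun r => PySem.Str.startswith code r) then c else findColor tail code := by
  induction rs with
  | nil => simp [findColor]
  | cons r rs ih =>
    by_cases h : PySem.Str.startswith code r = true
    · rw [List.map_cons, List.cons_append, findColor, List.find?_cons_of_pos (by simpa using h),
        List.any_cons, h]
      rfl
    · rw [List.map_cons, List.cons_append, findColor,
        List.find?_cons_of_neg (by simpa using h)]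
      rw [show ((((List.map (fun r => (r, c)) rs ++ tail).find? (fun p => PySem.Str.startswith code p.1)).map Prod.snd).getD "lightgray") = findColor (List.map (fun r => (r, c)) rs ++ tail) code from rfl]
      rw [ih, List.any_cons]
      simp only [Bool.not_eq_true] at h
      rw [h, Bool.false_or]

theorem aScan_eq_findColor (code : String) (groups : List (String × List String)) :
    aScan code groups = findColor (groups.flatMap (fun g => g.2.map (fun r => (r, g.1)))) code := by
  induction groups with
  | nil => simp [aScan, findColor]
  | cons g rest ih =>
    obtain ⟨c, rs⟩ := g
    rw [List.flatMap_cons, findColor_group, aScan, ih]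

-- concrete facts about the two tables, checked by computation
theorem keys_nodup : (flatPairs.map Prod.fst).Nodup := by decide

-- parsing the one-column table yields exactly A's flattened pairs, in order
theorem map_partition : itemsList.map partitionColon = flatPairs := by rfl

theorem prefixDict_eq : prefixDict = PySem.Dict.ofList flatPairs := by
  rw [← map_partition]
  unfold prefixDict PySem.Dict.ofList PySem.Dict.update
  rw [List.foldl_map]

-- B's parsed dict holds exactly A's flattened pairs, in order
theorem items_eq : prefixDict.items = flatPairs := by
  rw [prefixDict_eq]; rfl

theorem keys_nonempty : ∀ p ∈ flatPairs, 1 ≤ p.1.toList.length := by decide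

theorem keys_eq : prefixDict.keys = flatPairs.map Prod.fst := by
  unfold PySem.Dict.keys
  rw [items_eq]

theorem maxPrefixLen_eq : maxPrefixLen = 6 := by
  unfold maxPrefixLen; rw [keys_eq]; decide

theorem keys_short : ∀ p ∈ flatPairs, p.1.toList.length ≤ maxPrefixLen := by
  simp only [maxPrefixLen_eq]; decide

theorem keys_indep_bool :
    flatPairs.all (fun p => flatPairs.all (fun q =>
      (p.1 == q.1) || !(p.1.toList.isPrefixOf q.1.toList))) = true := by rfl

theorem keys_indep : ∀ p ∈ flatPairs, ∀ q ∈ flatPairs, p.1 ≠ q.1 → ¬ (p.1.toList <+: q.1.toList) := by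
  intro p hp q hq hne hpre
  have h2 := List.all_eq_true.mp (List.all_eq_true.mp keys_indep_bool p hp) q hq
  rcases Bool.or_eq_true_iff.mp h2 with h3 | h3
  · exact hne (by simpa using h3)
  · rw [Bool.not_eq_eq_eq_not, Bool.not_true] at h3
    rw [← List.isPrefixOf_iff_prefix] at hpre
    rw [hpre] at h3
    cases h3

theorem dictKeys_nodup : prefixDict.keys.Nodup := by
  rw [keys_eq]; exact keys_nodup

theorem get?_of_mem (p : String × String) (hp : p ∈ flatPairs) :
    prefixDict.get? p.1 = some p.2 := by
  apply PySem.Dict.get?_of_mem_items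
  · rw [items_eq]; exact hp
  · exact dictKeys_nodup

theorem mem_of_get? (s c : String) (h : prefixDict.get? s = some c) : (s, c) ∈ flatPairs := by
  have h2 := PySem.Dict.mem_items_of_get?_eq_some (d := prefixDict) h
  rwa [items_eq] at h2

theorem bScan_none (code : String) (i : Nat)
    (h : ∀ j, 1 ≤ j → j ≤ i → prefixDict.get? (String.ofList (code.toList.take j)) = none) :
    bScan code i = "lightgray" := by
  induction i with
  | zero => rfl
  | succ i ih =>
    have h1 := h (i + 1) (by omega) (by omega)
    simp only [bScan, h1]
    exact ih (fun j hj1 hj2 => h j hj1 (by omega))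

theorem bScan_found (code c : String) (m i : Nat) (hm1 : 1 ≤ m) (hmi : m ≤ i)
    (hget : prefixDict.get? (String.ofList (code.toList.take m)) = some c)
    (habove : ∀ j, m < j → j ≤ i → prefixDict.get? (String.ofList (code.toList.take j)) = none) :
    bScan code i = c := by
  induction i with
  | zero => omega
  | succ i ih =>
    by_cases h : m = i + 1
    · subst h; simp only [bScan, hget]
    · have hnone := habove (i + 1) (by omega) (by omega)
      simp only [bScan, hnone]
      exact ih (by omega) (fun j hj1 hj2 => habove j hj1 (by omega))

theorem startswith_iff (code p : String) :
    PySem.Str.startswith code p = true ↔ p.toList <+: code.toList := by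
  simp [PySem.Chars.startswith_iff]

theorem toList_ofList (l : List Char) : (String.ofList l).toList = l := by simp

-- the main equivalence
theorem main_eq (code : String) : get_reagent_color code = get_reagent_color_alt code := by
  rw [get_reagent_color, aScan_eq_findColor]
  show findColor flatPairs code = get_reagent_color_alt code
  rw [get_reagent_color_alt, findColor]
  cases hfind : flatPairs.find? (fun p => PySem.Str.startswith code p.1) with
  | none =>
    rw [List.find?_eq_none] at hfind
    refine (bScan_none code _ (fun j hj1 hj2 => ?_)).symm
    cases hget : prefixDict.get? (String.ofList (code.toList.take j)) with
    | none => rfl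
    | some c =>
      exfalso
      have hmem := mem_of_get? _ _ hget
      apply hfind _ hmem
      show PySem.Str.startswith code (String.ofList (code.toList.take j)) = true
      rw [startswith_iff, toList_ofList]
      exact List.take_prefix j code.toList
  | some p =>
    have hmem := List.mem_of_find?_eq_some hfind
    have hq := List.find?_some hfind
    have hpre : p.1.toList <+: code.toList := by
      rw [← startswith_iff]; exact hq
    have hlen : p.1.toList.length ≤ code.toList.length := hpre.length_le
    have htake : code.toList.take p.1.toList.length = p.1.toList :=
      (List.prefix_iff_eq_take.mp hpre).symm
    refine (bScan_found code p.2 p.1.toList.length (min code.toList.length maxPrefixLen)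
      (keys_nonempty p hmem) (Nat.le_min.mpr ⟨hlen, keys_short p hmem⟩) ?_ ?_).symm
    · rw [htake]
      rw [show String.ofList p.1.toList = p.1 by simp]
      exact get?_of_mem p hmem
    · intro j hj1 hj2
      have hjlen : j ≤ code.toList.length := le_trans hj2 (Nat.min_le_left _ _)
      cases hget : prefixDict.get? (String.ofList (code.toList.take j)) with
      | none => rfl
      | some c =>
        exfalso
        have hmem2 := mem_of_get? _ _ hget
        have hne : p.1 ≠ String.ofList (code.toList.take j) := by
          intro h
          have hl : p.1.toList.length = j := by
            rw [h, toList_ofList, List.length_take, Nat.min_eq_left hjlen]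
          omega
        apply keys_indep p hmem _ hmem2 hne
        show p.1.toList <+: (String.ofList (code.toList.take j)).toList
        rw [toList_ofList]
        calc p.1.toList = (code.toList.take j).take p.1.toList.length := by
              rw [List.take_take, Nat.min_eq_left (by omega), htake]
          _ <+: code.toList.take j := List.take_prefix _ _

-- ===== VERDICT (by name: the statement is the Claim_ definition above) =====
theorem get_reagent_color_spec : Claim_equal_get_reagent_color := by
  intro code _
  exact main_eq code
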